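-- pv_equiv track=rewrite | github.com/darrenjrobinson/AzureAIHackathon | WebApp/app/services/drawing_analyzer.py | categorize_element
-- ===== SOURCE A (Python) =====
-- def categorize_element(name):
--     """Categorize construction elements"""
--     categories = {
--         'structural': {'wall', 'beam', 'column', 'foundation'},
--         'architectural': {'door', 'window', 'stairs'},
--         'mechanical': {'duct', 'pipe', 'outlet'},
--         'finish': {'floor', 'ceiling', 'roof'}
--     }
--
--     name = name.lower()
--     for category, elements in categories.items():
--         if name in elements:
--             return category
--     return 'other'
-- ===== SOURCE B (Python) =====
-- _ELEMENT_TO_CATEGORY = {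
--     'wall': 'structural', 'beam': 'structural', 'column': 'structural', 'foundation': 'structural',
--     'door': 'architectural', 'window': 'architectural', 'stairs': 'architectural',
--     'duct': 'mechanical', 'pipe': 'mechanical', 'outlet': 'mechanical',
--     'floor': 'finish', 'ceiling': 'finish', 'roof': 'finish',
-- }
--
-- def categorize_element(name):
--     """Categorize construction elements"""
--     return _ELEMENT_TO_CATEGORY.get(name.lower(), 'other')
-- ===== Notes on version B (the rewrite author's own statement) =====
-- stated objective: idiomatic
-- what changed: Replaces the per-category loop with set-membership tests by a single precomputed inverted dictionary keyword->category and one .get lookup with the fallback default.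
import Mathlib
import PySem

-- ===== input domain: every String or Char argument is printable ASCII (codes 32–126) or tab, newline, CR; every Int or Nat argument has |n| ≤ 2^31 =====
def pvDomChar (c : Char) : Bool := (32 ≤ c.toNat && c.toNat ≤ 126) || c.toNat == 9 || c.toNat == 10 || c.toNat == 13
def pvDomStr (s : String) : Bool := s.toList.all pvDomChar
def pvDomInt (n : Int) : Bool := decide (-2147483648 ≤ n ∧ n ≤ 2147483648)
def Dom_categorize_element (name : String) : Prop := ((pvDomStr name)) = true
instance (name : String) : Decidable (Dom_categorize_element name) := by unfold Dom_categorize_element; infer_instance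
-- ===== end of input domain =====

-- B replaces A's per-category loop with set membership by a single inverted keyword->category dictionary lookup (idiomatic).

-- ===== PORT A =====
-- the for-loop over categories.items() with early return
def pvCatLoop (lname : String) : List (String × PySem.Set String) → String
  | [] => "other"
  | (cat, elems) :: rest => if PySem.Set.contains elems lname then cat else pvCatLoop lname rest

def categorize_element (name : String) : String :=
  let categories : List (String × PySem.Set String) :=
    [("structural", PySem.Set.ofList ["wall", "beam", "column", "foundation"]),
     ("architectural", PySem.Set.ofList ["door", "window", "stairs"]),
     ("mechanical", PySem.Set.ofList ["duct", "pipe", "outlet"]),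
     ("finish", PySem.Set.ofList ["floor", "ceiling", "roof"])]
  pvCatLoop (PySem.Str.lower name) categories

-- ===== PORT B =====
def pvElementToCategory : PySem.Dict String String :=
  PySem.Dict.ofList
    [("wall", "structural"), ("beam", "structural"), ("column", "structural"), ("foundation", "structural"),
     ("door", "architectural"), ("window", "architectural"), ("stairs", "architectural"),
     ("duct", "mechanical"), ("pipe", "mechanical"), ("outlet", "mechanical"),
     ("floor", "finish"), ("ceiling", "finish"), ("roof", "finish")]

def categorize_element_alt (name : String) : String :=
  PySem.Dict.getD pvElementToCategory (PySem.Str.lower name) "other"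

-- ===== PRECONDITION & SPEC =====
def Spec_categorize_element (name : String) (out : String) : Prop := out = categorize_element_alt name
instance (name : String) (out : String) : Decidable (Spec_categorize_element name out) := by unfold Spec_categorize_element; infer_instance

-- ===== CLAIM (what is proved, stated in full; the proofs are below) =====
def Claim_equal_categorize_element : Prop := ∀ (name : String), Dom_categorize_element name → Spec_categorize_element name (categorize_element name)

-- ===== LEMMAS AND PROOFS =====
theorem pv_pointwise (s : String) :
    pvCatLoop s
      [("structural", PySem.Set.ofList ["wall", "beam", "column", "foundation"]),
       ("architectural", PySem.Set.ofList ["door", "window", "stairs"]),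
       ("mechanical", PySem.Set.ofList ["duct", "pipe", "outlet"]),
       ("finish", PySem.Set.ofList ["floor", "ceiling", "roof"])]
    = PySem.Dict.getD pvElementToCategory s "other" := by
  by_cases h1 : s = "wall"; · subst h1; decide
  by_cases h2 : s = "beam"; · subst h2; decide
  by_cases h3 : s = "column"; · subst h3; decide
  by_cases h4 : s = "foundation"; · subst h4; decide
  by_cases h5 : s = "door"; · subst h5; decide
  by_cases h6 : s = "window"; · subst h6; decide
  by_cases h7 : s = "stairs"; · subst h7; decide
  by_cases h8 : s = "duct"; · subst h8; decide
  by_cases h9 : s = "pipe"; · subst h9; decide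
  by_cases h10 : s = "outlet"; · subst h10; decide
  by_cases h11 : s = "floor"; · subst h11; decide
  by_cases h12 : s = "ceiling"; · subst h12; decide
  by_cases h13 : s = "roof"; · subst h13; decide
  have g1 : ¬ ("wall" = s) := fun h => h1 h.symm
  have g2 : ¬ ("beam" = s) := fun h => h2 h.symm
  have g3 : ¬ ("column" = s) := fun h => h3 h.symm
  have g4 : ¬ ("foundation" = s) := fun h => h4 h.symm
  have g5 : ¬ ("door" = s) := fun h => h5 h.symm
  have g6 : ¬ ("window" = s) := fun h => h6 h.symm
  have g7 : ¬ ("stairs" = s) := fun h => h7 h.symm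
  have g8 : ¬ ("duct" = s) := fun h => h8 h.symm
  have g9 : ¬ ("pipe" = s) := fun h => h9 h.symm
  have g10 : ¬ ("outlet" = s) := fun h => h10 h.symm
  have g11 : ¬ ("floor" = s) := fun h => h11 h.symm
  have g12 : ¬ ("ceiling" = s) := fun h => h12 h.symm
  have g13 : ¬ ("roof" = s) := fun h => h13 h.symm
  simp_all [pvCatLoop, pvElementToCategory, PySem.Set.contains, PySem.Set.ofList, PySem.Dict.getD,
    PySem.Dict.get?, PySem.Dict.ofList, PySem.Dict.update, PySem.Dict.insert, PySem.Dict.empty,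
    List.find?_cons_of_neg, beq_iff_eq]

-- ===== VERDICT (by name: the statement is the Claim_ definition above) =====
theorem categorize_element_spec : Claim_equal_categorize_element := by
  intro name _
  unfold Spec_categorize_element categorize_element categorize_element_alt
  exact pv_pointwise (PySem.Str.lower name)
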